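-- pv_equiv track=rewrite | github.com/Ni1xson/telegram-channel-monitor-main | monitor/filters.py | _check_phrase
-- ===== SOURCE A (Python) =====
-- from typing import List, Tuple, Dict
--
-- def _check_phrase(
--     text: str, keywords: List[str]
-- ) -> Tuple[List[str], List[Tuple[int, int]]]:
--     """Проверка точной фразы"""
--     matched = []
--     positions = []
--
--     for phrase in keywords:
--         if phrase in text:
--             matched.append(phrase)
--             pos = text.find(phrase)
--             positions.append((pos, pos + len(phrase)))
--
--     return matched, positions
-- ===== SOURCE B (Python) =====
-- def _check_phrase(text, keywords):
--     # Group the distinct keywords by length; slide over the text once and, at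
--     # each position, look the window of each length up in the corresponding
--     # group, recording the first position at which each keyword is seen.
--     by_len = {}
--     for kw in dict.fromkeys(keywords):
--         by_len.setdefault(len(kw), set()).add(kw)
--     first = {}
--     for i in range(len(text) + 1):
--         for L, kws in by_len.items():
--             w = text[i:i + L]
--             if w in kws and w not in first:
--                 first[w] = i
--     matched = []
--     positions = []
--     for kw in keywords:
--         if kw in first:
--             matched.append(kw)
--             positions.append((first[kw], first[kw] + len(kw)))
--     return matched, positions
-- ===== Notes on version B (the rewrite author's own statement) =====
-- stated objective: faster
-- what changed: Instead of A's per-keyword substring search over the whole text ('in' plus find for every keyword), B groups the distinct keywords by length into hash sets and makes one sliding-window pass over the text, looking the window of each keyword length up and recording each keyword's first match position, then emits results in the original keyword order.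
import Mathlib
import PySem

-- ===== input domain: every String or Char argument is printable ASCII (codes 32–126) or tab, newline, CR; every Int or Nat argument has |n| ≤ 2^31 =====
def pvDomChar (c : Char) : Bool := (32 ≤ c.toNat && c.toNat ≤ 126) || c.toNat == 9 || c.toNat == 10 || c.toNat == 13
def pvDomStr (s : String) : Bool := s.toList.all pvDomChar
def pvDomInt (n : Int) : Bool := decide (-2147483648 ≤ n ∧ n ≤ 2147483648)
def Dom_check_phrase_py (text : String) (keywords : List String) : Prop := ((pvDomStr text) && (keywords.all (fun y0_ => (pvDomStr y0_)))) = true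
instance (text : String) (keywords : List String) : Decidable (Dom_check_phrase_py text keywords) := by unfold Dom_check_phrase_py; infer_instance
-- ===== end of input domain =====

-- B replaces A's per-keyword substring searches (one text scan per keyword) by a
-- single sliding-window pass over the text with one hashed window lookup per
-- distinct keyword length, recording first match positions (objective: faster;
-- measured faster at scale in a timing run).

-- ===== PORT A =====
def check_phrase_py (text : String) (keywords : List String) : List String × (List (Int × Int)) :=
  keywords.foldl
    (fun acc phrase =>
      if PySem.Str.isIn phrase text then
        let pos := PySem.Str.find text phrase
        (acc.1 ++ [phrase], acc.2 ++ [(pos, pos + PySem.Str.len phrase)])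
      else acc)
    ([], [])

-- ===== PORT B =====
-- the body of B's inner 'for L, kws in by_len.items()' loop
def cpStep (text : String) (i : Int) (f : PySem.Dict String Int)
    (p : Int × PySem.Set String) : PySem.Dict String Int :=
  let w := PySem.Str.slice text (some i) (some (i + p.1))
  if PySem.Set.contains p.2 w && !f.contains w then f.insert w i else f

def check_phrase_py_alt (text : String) (keywords : List String) : List String × (List (Int × Int)) :=
  -- by_len.setdefault(len(kw), set()).add(kw) over the distinct keywords
  let by_len : PySem.Dict Int (PySem.Set String) :=
    (PySem.List.dedup keywords).foldl
      (fun d kw => d.modify (PySem.Str.len kw) PySem.Set.empty (fun s => PySem.Set.add s kw))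
      PySem.Dict.empty
  -- for i in range(len(text)+1): for L, kws in by_len.items(): w = text[i:i+L]; …
  let first : PySem.Dict String Int :=
    (PySem.List.pyRange 0 (PySem.Str.len text + 1)).foldl
      (fun f i => by_len.items.foldl (fun f p => cpStep text i f p) f)
      PySem.Dict.empty
  keywords.foldl
    (fun acc kw =>
      match first.get? kw with
      | some p => (acc.1 ++ [kw], acc.2 ++ [(p, p + PySem.Str.len kw)])
      | none => acc)
    ([], [])

-- ===== PRECONDITION & SPEC =====
def Spec_check_phrase_py (text : String) (keywords : List String) (out : List String × (List (Int × Int))) : Prop := out = check_phrase_py_alt text keywords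
instance (text : String) (keywords : List String) (out : List String × (List (Int × Int))) : Decidable (Spec_check_phrase_py text keywords out) := by unfold Spec_check_phrase_py; infer_instance

-- ===== CLAIM (what is proved, stated in full; the proofs are below) =====
def Claim_equal_check_phrase_py : Prop := ∀ (text : String) (keywords : List String), Dom_check_phrase_py text keywords → Spec_check_phrase_py text keywords (check_phrase_py text keywords)

-- ===== LEMMAS AND PROOFS =====

-- "kw occurs at position i" as the window test B performs
def cpMatch (text : String) (i : Int) (kw : String) : Bool :=
  PySem.Str.slice text (some i) (some (i + PySem.Str.len kw)) == kw

-- shorthand for the first-occurrence index used by the proofs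
def cpF (text kw : String) : Int := PySem.Chars.find text.toList kw.toList

lemma cpMatch_iff (text : String) (j : Nat) (kw : String) :
    cpMatch text (j : Int) kw = true ↔ kw.toList <+: text.toList.drop j := by
  have key : (PySem.Str.slice text (some (j : Int)) (some ((j : Int) + (kw.toList.length : Int)))).toList
      = (text.toList.drop j).take kw.toList.length := by
    rw [PySem.Str.toList_slice, PySem.Chars.slice_eq_listSlice, PySem.List.slice_natCast_add]
  simp only [cpMatch, PySem.Str.len_eq]
  rw [beq_iff_eq, ← String.toList_inj, key, List.prefix_iff_eq_take]
  exact eq_comm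

-- an occurrence at j bounds the first occurrence
lemma occ_find (text : String) (kw : String) (j : Nat)
    (h : kw.toList <+: text.toList.drop j) :
    0 ≤ cpF text kw ∧ cpF text kw ≤ (j : Int) := by
  unfold cpF
  have hin : PySem.Chars.isIn kw.toList text.toList = true :=
    (PySem.Chars.exists_prefix_drop_iff_isIn kw.toList text.toList).mp ⟨j, h⟩
  have h0 : 0 ≤ PySem.Chars.find text.toList kw.toList :=
    (PySem.Chars.find_nonneg_iff text.toList kw.toList).mpr
      ((PySem.Chars.isIn_iff_infix kw.toList text.toList).mp hin)
  refine ⟨h0, ?_⟩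
  by_contra hlt
  exact (PySem.Chars.find_spec h0).2 j (by omega) h

-- for a keyword not found before position j, matching at j means its first occurrence is j
lemma pendMatch (text : String) (kw : String) (j : Nat)
    (hp : ¬ (0 ≤ cpF text kw ∧ cpF text kw < (j : Int))) :
    (cpMatch text (j : Int) kw = true) ↔ cpF text kw = (j : Int) := by
  rw [cpMatch_iff]
  constructor
  · intro h
    have := occ_find text kw j h
    omega
  · intro h
    have h0 : 0 ≤ PySem.Chars.find text.toList kw.toList := by unfold cpF at h; omega
    have hpref := (PySem.Chars.find_spec h0).1
    have ht : (PySem.Chars.find text.toList kw.toList).toNat = j := by unfold cpF at h; omega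
    rwa [ht] at hpref

-- membership in the by-length groups, characterised over the building fold
lemma byLen_getD (ks : List String) (d : PySem.Dict Int (PySem.Set String)) (L : Int) (s : String) :
    s ∈ (ks.foldl
        (fun d kw => d.modify (PySem.Str.len kw) PySem.Set.empty (fun s => PySem.Set.add s kw))
        d).getD L PySem.Set.empty
      ↔ (s ∈ d.getD L PySem.Set.empty ∨ (s ∈ ks ∧ PySem.Str.len s = L)) := by
  induction ks generalizing d with
  | nil => simp
  | cons kw rest ih =>
    rw [List.foldl_cons, ih]
    by_cases hL : L = PySem.Str.len kw
    · subst hL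
      rw [PySem.Dict.getD_modify, if_pos rfl, PySem.Set.mem_add]
      constructor
      · rintro (⟨h | h⟩ | h)
        · exact Or.inl h
        · exact Or.inr ⟨h ▸ List.mem_cons_self, by rw [h]⟩
        · exact Or.inr ⟨List.mem_cons_of_mem _ h.1, h.2⟩
      · rintro (h | ⟨hm, hlen⟩)
        · exact Or.inl (Or.inl h)
        · rcases List.mem_cons.mp hm with rfl | hm'
          · exact Or.inl (Or.inr rfl)
          · exact Or.inr ⟨hm', hlen⟩
    · rw [PySem.Dict.getD_modify, if_neg hL]
      constructor
      · rintro (h | h)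
        · exact Or.inl h
        · exact Or.inr ⟨List.mem_cons_of_mem _ h.1, h.2⟩
      · rintro (h | ⟨hm, hlen⟩)
        · exact Or.inl h
        · rcases List.mem_cons.mp hm with rfl | hm'
          · exact absurd hlen.symm hL
          · exact Or.inr ⟨hm', hlen⟩

lemma cpStep_eq (text : String) (i : Int) (f : PySem.Dict String Int)
    (p : Int × PySem.Set String) :
    cpStep text i f p =
      if PySem.Set.contains p.2 (PySem.Str.slice text (some i) (some (i + p.1)))
          && !f.contains (PySem.Str.slice text (some i) (some (i + p.1)))
      then f.insert (PySem.Str.slice text (some i) (some (i + p.1))) i else f := rfl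

-- the inner items loop records exactly a fresh first match of some grouped keyword
lemma innerFold (text : String) (i : Int) (items : List (Int × PySem.Set String))
    (hlen : ∀ p ∈ items, ∀ s ∈ p.2, PySem.Str.len s = p.1)
    (f : PySem.Dict String Int) (kw : String) :
    (items.foldl (fun f p => cpStep text i f p) f).get? kw
      = if (∃ p ∈ items, kw ∈ p.2) ∧ f.contains kw = false ∧ cpMatch text i kw = true
        then some i else f.get? kw := by
  revert hlen
  induction items generalizing f with
  | nil => intro _; simp
  | cons p rest ih =>
    intro hlen
    rw [List.foldl_cons, cpStep_eq]
    have hlenrest : ∀ q ∈ rest, ∀ s ∈ q.2, PySem.Str.len s = q.1 :=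
      fun q hq => hlen q (List.mem_cons_of_mem _ hq)
    -- if kw belongs to this group and matches at i, the window IS kw
    have hkey : kw ∈ p.2 → cpMatch text i kw = true →
        PySem.Str.slice text (some i) (some (i + p.1)) = kw := by
      intro hkwp hm
      have hL : PySem.Str.len kw = p.1 := hlen p (List.mem_cons_self) kw hkwp
      unfold cpMatch at hm
      rw [← hL]
      exact beq_iff_eq.mp hm
    by_cases hfire : (PySem.Set.contains p.2 (PySem.Str.slice text (some i) (some (i + p.1)))
        && !f.contains (PySem.Str.slice text (some i) (some (i + p.1)))) = true
    · rw [hfire, if_pos rfl]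
      rw [ih _ hlenrest]
      rw [Bool.and_eq_true, Bool.not_eq_eq_eq_not, Bool.not_true] at hfire
      obtain ⟨hw, hnc⟩ := hfire
      have hwmem : PySem.Str.slice text (some i) (some (i + p.1)) ∈ p.2 :=
        (PySem.Set.contains_iff _ _).mp hw
      by_cases hwkw : PySem.Str.slice text (some i) (some (i + p.1)) = kw
      · rw [hwkw] at hwmem hnc ⊢
        have hmatch : cpMatch text i kw = true := by
          unfold cpMatch
          rw [show i + PySem.Str.len kw = i + p.1 from by
            rw [hlen p List.mem_cons_self kw hwmem]]
          rw [beq_iff_eq]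
          exact hwkw
        have hct : (f.insert kw i).contains kw = true := PySem.Dict.contains_insert_self f kw i
        rw [if_neg (fun hx => by rw [hct] at hx; exact absurd hx.2.1 (by simp))]
        rw [if_pos ⟨⟨p, List.mem_cons_self, hwmem⟩, hnc, hmatch⟩]
        exact PySem.Dict.get?_insert_self f kw i
      · have hgs : (f.insert (PySem.Str.slice text (some i) (some (i + p.1))) i).get? kw
            = f.get? kw :=
          PySem.Dict.get?_insert_of_ne f i (fun h => hwkw h.symm)
        have hcs : (f.insert (PySem.Str.slice text (some i) (some (i + p.1))) i).contains kw
            = f.contains kw := by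
          rw [PySem.Dict.contains_insert]
          rw [show (kw == PySem.Str.slice text (some i) (some (i + p.1))) = false from
            beq_eq_false_iff_ne.mpr (fun h => hwkw h.symm)]
          rw [Bool.false_or]
        rw [hgs, hcs]
        have hiff : ((∃ q ∈ p :: rest, kw ∈ q.2) ∧ f.contains kw = false ∧ cpMatch text i kw = true)
            ↔ ((∃ q ∈ rest, kw ∈ q.2) ∧ f.contains kw = false ∧ cpMatch text i kw = true) := by
          constructor
          · rintro ⟨⟨q, hq, hkwq⟩, h2, h3⟩
            rcases List.mem_cons.mp hq with rfl | hq'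
            · exact absurd (hkey hkwq h3) hwkw
            · exact ⟨⟨q, hq', hkwq⟩, h2, h3⟩
          · rintro ⟨⟨q, hq, hkwq⟩, h2, h3⟩
            exact ⟨⟨q, List.mem_cons_of_mem _ hq, hkwq⟩, h2, h3⟩
        rw [if_congr hiff rfl rfl]
    · rw [Bool.not_eq_true] at hfire
      rw [hfire, if_neg (by simp : ¬ (false = true))]
      rw [ih _ hlenrest]
      have hiff : ((∃ q ∈ p :: rest, kw ∈ q.2) ∧ f.contains kw = false ∧ cpMatch text i kw = true)
          ↔ ((∃ q ∈ rest, kw ∈ q.2) ∧ f.contains kw = false ∧ cpMatch text i kw = true) := by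
        constructor
        · rintro ⟨⟨q, hq, hkwq⟩, h2, h3⟩
          rcases List.mem_cons.mp hq with rfl | hq'
          · exfalso
            have : (q.2.contains (PySem.Str.slice text (some i) (some (i + q.1)))
                && !f.contains (PySem.Str.slice text (some i) (some (i + q.1)))) = true := by
              rw [hkey hkwq h3, Bool.and_eq_true, Bool.not_eq_eq_eq_not, Bool.not_true]
              exact ⟨(PySem.Set.contains_iff _ _).mpr hkwq, h2⟩
            rw [hkey hkwq h3] at hfire
            rw [hkey hkwq h3] at this
            rw [hfire] at this
            exact absurd this (by simp)
          · exact ⟨⟨q, hq', hkwq⟩, h2, h3⟩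
        · rintro ⟨⟨q, hq, hkwq⟩, h2, h3⟩
          exact ⟨⟨q, List.mem_cons_of_mem _ hq, hkwq⟩, h2, h3⟩
      rw [if_congr hiff rfl rfl]

-- abbreviation for B's by-length grouping
def cpByLen (keywords : List String) : PySem.Dict Int (PySem.Set String) :=
  (PySem.List.dedup keywords).foldl
    (fun d kw => d.modify (PySem.Str.len kw) PySem.Set.empty (fun s => PySem.Set.add s kw))
    PySem.Dict.empty

lemma cpByLen_nodup (keywords : List String) : (cpByLen keywords).keys.Nodup :=
  PySem.Dict.nodup_keys_foldl_modify_key (PySem.List.dedup keywords)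
    (fun kw => PySem.Str.len kw) PySem.Set.empty (fun _ kw s => PySem.Set.add s kw)
    PySem.Dict.empty PySem.Dict.nodup_keys_empty

lemma cpByLen_getD (keywords : List String) (L : Int) (s : String) :
    s ∈ (cpByLen keywords).getD L PySem.Set.empty
      ↔ (s ∈ PySem.List.dedup keywords ∧ PySem.Str.len s = L) := by
  unfold cpByLen
  rw [byLen_getD]
  constructor
  · rintro (h | h)
    · rw [PySem.Dict.getD_eq_get?_getD, PySem.Dict.get?_empty] at h
      exact absurd h (by simp [PySem.Set.empty])
    · exact h
  · exact Or.inr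

lemma cpByLen_len (keywords : List String) (p : Int × PySem.Set String)
    (hp : p ∈ (cpByLen keywords).items) (s : String) (hs : s ∈ p.2) :
    PySem.Str.len s = p.1 := by
  have := PySem.Dict.getD_of_mem_items (cpByLen keywords)
    (show (p.1, p.2) ∈ (cpByLen keywords).items from hp) (cpByLen_nodup keywords)
    PySem.Set.empty
  rw [← this] at hs
  exact ((cpByLen_getD keywords p.1 s).mp hs).2

lemma cpByLen_mem (keywords : List String) (kw : String) :
    (∃ p ∈ (cpByLen keywords).items, kw ∈ p.2) ↔ kw ∈ PySem.List.dedup keywords := by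
  constructor
  · rintro ⟨p, hp, hkw⟩
    have := PySem.Dict.getD_of_mem_items (cpByLen keywords)
      (show (p.1, p.2) ∈ (cpByLen keywords).items from hp) (cpByLen_nodup keywords)
      PySem.Set.empty
    rw [← this] at hkw
    exact ((cpByLen_getD keywords p.1 kw).mp hkw).1
  · intro hkw
    have hmem : kw ∈ (cpByLen keywords).getD (PySem.Str.len kw) PySem.Set.empty :=
      (cpByLen_getD keywords (PySem.Str.len kw) kw).mpr ⟨hkw, rfl⟩
    rw [PySem.Dict.getD_eq_get?_getD] at hmem
    cases hget : (cpByLen keywords).get? (PySem.Str.len kw) with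
    | none =>
      rw [hget] at hmem
      exact absurd hmem (by simp [PySem.Set.empty])
    | some S =>
      rw [hget] at hmem
      exact ⟨(PySem.Str.len kw, S), PySem.Dict.mem_items_of_get?_eq_some _ hget, hmem⟩

-- main scan invariant: after scanning positions 0..j-1 the map records exactly the
-- first occurrence of each distinct keyword that starts before j
lemma scan_inv (text : String) (keywords : List String) (j : Nat) :
    ∀ kw : String,
      ((PySem.List.pyRange 0 (j : Int)).foldl
          (fun f i =>
            (cpByLen keywords).items.foldl (fun f p => cpStep text i f p) f)
          PySem.Dict.empty).get? kw
        = if kw ∈ PySem.List.dedup keywords ∧ 0 ≤ cpF text kw ∧ cpF text kw < (j : Int)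
          then some (cpF text kw) else none := by
  induction j with
  | zero =>
    intro kw
    rw [show ((0 : Nat) : Int) = 0 by norm_num, PySem.List.pyRange_one_eq_nil le_rfl,
      List.foldl_nil]
    rw [if_neg (by rintro ⟨-, h1, h2⟩; omega), PySem.Dict.get?_empty]
  | succ j ih =>
    intro kw
    have hsplit : PySem.List.pyRange 0 ((j + 1 : Nat) : Int)
        = PySem.List.pyRange 0 (j : Int) ++ [(j : Int)] := by
      push_cast
      exact PySem.List.pyRange_one_succ_right (by positivity)
    rw [hsplit, List.foldl_append, List.foldl_cons, List.foldl_nil]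
    rw [innerFold text (j : Int) _ (cpByLen_len keywords) _ kw]
    have hold := ih kw
    have hcf : (((PySem.List.pyRange 0 (j : Int)).foldl
          (fun f i =>
            (cpByLen keywords).items.foldl (fun f p => cpStep text i f p) f)
          PySem.Dict.empty).contains kw = false)
        ↔ ¬ (kw ∈ PySem.List.dedup keywords ∧ 0 ≤ cpF text kw ∧ cpF text kw < (j : Int)) := by
      rw [← PySem.Dict.get?_eq_none_iff_contains, hold]
      by_cases hx : kw ∈ PySem.List.dedup keywords ∧ 0 ≤ cpF text kw ∧ cpF text kw < (j : Int)
      · simp [hx]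
      · simp only [if_neg hx]
        simp
        intro hm h0
        have hmd : kw ∈ PySem.List.dedup keywords := (PySem.List.mem_dedup _ _).mpr hm
        exact le_of_not_gt (fun hlt => hx ⟨hmd, h0, hlt⟩)
    simp only [hold, cpByLen_mem]
    push_cast
    by_cases hD : kw ∈ PySem.List.dedup keywords
    · by_cases holdc : 0 ≤ cpF text kw ∧ cpF text kw < (j : Int)
      · rw [if_neg (fun hx => (hcf.mp hx.2.1) ⟨hD, holdc⟩), if_pos ⟨hD, holdc⟩,
          if_pos ⟨hD, holdc.1, by omega⟩]
      · have hcfT := hcf.mpr (fun hx => holdc hx.2)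
        by_cases hM : cpMatch text ((j : Nat) : Int) kw = true
        · have hF : cpF text kw = (j : Int) := (pendMatch text kw j (fun hx => holdc hx)).mp hM
          rw [if_pos ⟨hD, hcfT, hM⟩, if_pos ⟨hD, by omega, by omega⟩, hF]
        · have hA1 : ¬ (kw ∈ PySem.List.dedup keywords ∧ 0 ≤ cpF text kw ∧
              cpF text kw < (j : Int) + 1) := by
            rintro ⟨-, h0, hj⟩
            by_cases hFj : cpF text kw = (j : Int)
            · exact hM ((pendMatch text kw j (fun hx => holdc hx)).mpr hFj)
            · exact holdc ⟨h0, by omega⟩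
          rw [if_neg (fun hx => hM hx.2.2), if_neg (fun hx => holdc hx.2), if_neg hA1]
    · rw [if_neg (fun hx => hD hx.1), if_neg (fun hx => hD hx.1), if_neg (fun hx => hD hx.1)]

-- ===== VERDICT (by name: the statement is the Claim_ definition above) =====
theorem check_phrase_py_spec : Claim_equal_check_phrase_py := by
  intro text keywords _
  unfold Spec_check_phrase_py check_phrase_py check_phrase_py_alt
  have hlen : PySem.Str.len text + 1 = ((text.toList.length + 1 : Nat) : Int) := by
    rw [PySem.Str.len_eq]; push_cast; ring
  rw [hlen]
  have hget := scan_inv text keywords (text.toList.length + 1)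
  unfold cpByLen at hget
  apply PySem.List.foldl_congr_mem
  intro acc kw hmem
  rw [hget kw]
  have hD : kw ∈ PySem.List.dedup keywords := by
    rw [PySem.List.mem_dedup]; exact hmem
  by_cases h0 : 0 ≤ cpF text kw
  · have hlt : cpF text kw < ((text.toList.length + 1 : Nat) : Int) := by
      have := PySem.Chars.find_le_length text.toList kw.toList
      unfold cpF
      push_cast
      omega
    have hin : PySem.Str.isIn kw text = true := by
      rw [PySem.Str.isIn_eq, PySem.Chars.isIn_iff_infix]
      exact (PySem.Chars.find_nonneg_iff text.toList kw.toList).mp h0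
    have hcond : kw ∈ PySem.List.dedup keywords ∧ 0 ≤ cpF text kw ∧
        cpF text kw < ((text.toList.length + 1 : Nat) : Int) := ⟨hD, h0, hlt⟩
    simp only [hin, if_true, if_pos hcond]
    rw [show cpF text kw = PySem.Str.find text kw from (PySem.Str.find_eq text kw).symm]
  · have hni : PySem.Str.isIn kw text = false := by
      rw [PySem.Str.isIn_eq]
      rw [show (PySem.Chars.isIn kw.toList text.toList = false)
            ↔ ¬ PySem.Chars.isIn kw.toList text.toList = true from by simp]
      intro hc
      exact h0 ((PySem.Chars.find_nonneg_iff text.toList kw.toList).mpr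
        ((PySem.Chars.isIn_iff_infix kw.toList text.toList).mp hc))
    have hcond : ¬ (kw ∈ PySem.List.dedup keywords ∧ 0 ≤ cpF text kw ∧
        cpF text kw < ((text.toList.length + 1 : Nat) : Int)) := fun hx => h0 hx.2.1
    simp only [hni, Bool.false_eq_true, if_false, if_neg hcond]
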